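-- pv_equiv track=rewrite | github.com/MrBrantCode/unitest_baseline | mut_generate/mist_train_cf/cf_25399/solution.py | is_a_power_of
-- ===== SOURCE A (Python) =====
-- def is_a_power_of(x, y):
--     if x == y:
--         return True
--     if y == 1:
--         return True
--     if y % x != 0:
--         return False
--     return is_a_power_of(x, y // x)
-- ===== SOURCE B (Python) =====
-- def is_a_power_of(x, y):
--     if x == y:
--         return True
--     if y == 1:
--         return True
--     if abs(x) <= 1 or y == 0:
--         return False
--     p = x
--     while abs(p) < abs(y):
--         p *= x
--     return p == y
-- ===== Notes on version B (the rewrite author's own statement) =====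
-- stated objective: alternative
-- what changed: B multiplies an accumulator p upward by x until |p| reaches |y| and compares p == y, instead of A's recursive divide-down by x with a modulus test at every step; degenerate bases (|x| <= 1) and y == 0 are handled by one explicit guard.
import Mathlib
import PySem

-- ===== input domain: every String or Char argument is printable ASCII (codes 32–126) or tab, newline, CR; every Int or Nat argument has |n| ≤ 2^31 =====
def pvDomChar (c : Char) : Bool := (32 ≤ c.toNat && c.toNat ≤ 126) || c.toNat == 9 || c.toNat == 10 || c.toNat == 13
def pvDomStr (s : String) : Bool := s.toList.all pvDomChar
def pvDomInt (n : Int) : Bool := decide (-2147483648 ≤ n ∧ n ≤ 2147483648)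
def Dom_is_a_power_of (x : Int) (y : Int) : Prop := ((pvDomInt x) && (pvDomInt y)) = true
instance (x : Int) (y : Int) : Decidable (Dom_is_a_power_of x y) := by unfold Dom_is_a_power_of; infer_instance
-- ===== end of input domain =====

-- B replaces A's divide-down recursion by a multiply-up loop (accumulator p = x, x^2, …
-- compared against y) with one explicit guard for degenerate bases; same cost (alternative).
-- Outside Pre_, A raises (RecursionError / ZeroDivisionError) while B returns False;
-- the crash-fix is noted here in prose only.

-- ===== PORT A =====
-- A recurses on y // x; fuel y.natAbs + 1 only makes the recursion total in Lean: on every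
-- input satisfying Pre_ the fuel is never exhausted (|y| at least halves each step).
def is_a_power_of_go (x : Int) (fuel : Nat) (y : Int) : Bool :=
  match fuel with
  | 0 => false
  | fuel + 1 =>
    if x = y then true
    else if y = 1 then true
    else if PySem.Int.mod y x ≠ 0 then false
    else is_a_power_of_go x fuel (PySem.Int.floordiv y x)

def is_a_power_of (x : Int) (y : Int) : Bool :=
  is_a_power_of_go x (y.natAbs + 1) y

-- ===== PORT B =====
-- while abs(p) < abs(y): p *= x.  The extra conjuncts 2 ≤ x.natAbs and 1 ≤ p.natAbs are
-- termination guards only: every actual call from is_a_power_of_alt satisfies them.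
def is_a_power_of_loop (x : Int) (p : Int) (y : Int) : Bool :=
  if h : 2 ≤ x.natAbs ∧ 1 ≤ p.natAbs ∧ p.natAbs < y.natAbs then
    is_a_power_of_loop x (p * x) y
  else
    decide (p = y)
termination_by y.natAbs - p.natAbs
decreasing_by
  have h2 : p.natAbs * 2 ≤ p.natAbs * x.natAbs := Nat.mul_le_mul_left _ h.1
  have h3 : (p * x).natAbs = p.natAbs * x.natAbs := Int.natAbs_mul p x
  omega

def is_a_power_of_alt (x : Int) (y : Int) : Bool :=
  if x = y then true
  else if y = 1 then true
  else if x.natAbs ≤ 1 ∨ y = 0 then false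
  else is_a_power_of_loop x x y

-- ===== PRECONDITION & SPEC =====
-- Pre_ excludes exactly the inputs on which A never returns: x = 0 with y ∉ {0,1}
-- (ZeroDivisionError) and the unbounded recursions (y = 0 with x ≠ 0; x = 1 with y ≠ 1;
-- x = -1 with y ∉ {1,-1}), which hit Python's RecursionError.
def Pre_is_a_power_of (x : Int) (y : Int) : Prop :=
  (x = 0 → y = 0 ∨ y = 1) ∧ (y = 0 → x = 0) ∧ (x = 1 → y = 1) ∧ (x = -1 → y = 1 ∨ y = -1)
instance (x : Int) (y : Int) : Decidable (Pre_is_a_power_of x y) := by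
  unfold Pre_is_a_power_of; infer_instance

def pvWitness_is_a_power_of : Int × Int := (3, 27)

def Spec_is_a_power_of (x : Int) (y : Int) (out : Bool) : Prop := out = is_a_power_of_alt x y
instance (x : Int) (y : Int) (out : Bool) : Decidable (Spec_is_a_power_of x y out) := by
  unfold Spec_is_a_power_of; infer_instance

-- ===== CLAIM (what is proved, stated in full; the proofs are below) =====
def Claim_equal_is_a_power_of : Prop := ∀ (x : Int) (y : Int), Dom_is_a_power_of x y → Pre_is_a_power_of x y → Spec_is_a_power_of x y (is_a_power_of x y)

-- ===== LEMMAS AND PROOFS =====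

-- A's recursion computes "y is a power of x" when the fuel is at least |y|.
theorem is_a_power_of_go_iff (x : Int) (hx : 2 ≤ x.natAbs) :
    ∀ (fuel : Nat) (y : Int), y ≠ 0 → y.natAbs ≤ fuel →
      (is_a_power_of_go x fuel y = true ↔ ∃ k : Nat, y = x ^ k) := by
  intro fuel
  induction fuel with
  | zero =>
    intro y hy hfy
    exact absurd (Int.natAbs_eq_zero.mp (Nat.le_zero.mp hfy)) hy
  | succ n ih =>
    intro y hy hfy
    rw [is_a_power_of_go]
    by_cases hxy : x = y
    · rw [if_pos hxy]
      simp only [true_iff]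
      exact ⟨1, by rw [pow_one, hxy]⟩
    · rw [if_neg hxy]
      by_cases hy1 : y = 1
      · rw [if_pos hy1]
        simp only [true_iff]
        exact ⟨0, by rw [pow_zero, hy1]⟩
      · rw [if_neg hy1]
        by_cases hm : PySem.Int.mod y x = 0
        · -- divisible branch: recurse on q = y // x with q * x = y
          simp only [hm, ne_eq, not_true_eq_false, if_false]
          have hq : PySem.Int.floordiv y x * x = y := by
            have := PySem.Int.floordiv_mul_add_mod y x
            omega
          generalize hqdef : PySem.Int.floordiv y x = q at hq ⊢
          have hx0 : x ≠ 0 := by omega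
          have hq0 : q ≠ 0 := by
            intro h; rw [h, zero_mul] at hq; exact hy hq.symm
          have hqa : q.natAbs * x.natAbs = y.natAbs := by
            rw [← Int.natAbs_mul, hq]
          have hqn : q.natAbs ≤ n := by
            have ha : 1 ≤ q.natAbs := by omega
            have hb : q.natAbs * 2 ≤ q.natAbs * x.natAbs := Nat.mul_le_mul_left _ hx
            omega
          rw [ih q hq0 hqn]
          constructor
          · rintro ⟨k, hk⟩
            exact ⟨k + 1, by rw [← hq, hk, pow_succ]⟩
          · rintro ⟨k, hk⟩
            cases k with
            | zero => exact absurd (by simpa using hk) hy1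
            | succ j =>
              refine ⟨j, ?_⟩
              have hqq : q * x = x ^ j * x := by rw [hq, hk, pow_succ]
              exact mul_right_cancel₀ hx0 hqq
        · -- not divisible: no power of x equals y
          simp only [ne_eq, hm, not_false_eq_true, if_true]
          apply iff_of_false (by simp)
          rintro ⟨k, hk⟩
          cases k with
          | zero => exact hy1 (by simpa using hk)
          | succ j =>
            apply hm
            rw [PySem.Int.mod_eq_zero_iff_dvd, hk, pow_succ]
            exact Dvd.intro (x ^ j) (mul_comm x (x ^ j))

-- B's loop: under the invariants |x| ≥ 2, |p| ≥ 1 it answers ∃ k, y = p * x^k.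
theorem is_a_power_of_loop_iff (x y : Int) (hx : 2 ≤ x.natAbs) :
    ∀ p : Int, 1 ≤ p.natAbs →
      (is_a_power_of_loop x p y = true ↔ ∃ k : Nat, y = p * x ^ k) := by
  intro p
  induction p using is_a_power_of_loop.induct (x := x) (y := y) with
  | case1 p h ih =>
    intro hp
    rw [is_a_power_of_loop, dif_pos h]
    have hpx : 1 ≤ (p * x).natAbs := by
      rw [Int.natAbs_mul]
      have := Nat.mul_le_mul hp hx
      omega
    rw [ih hpx]
    constructor
    · rintro ⟨k, hk⟩
      exact ⟨k + 1, by rw [hk, pow_succ]; ring⟩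
    · rintro ⟨k, hk⟩
      cases k with
      | zero =>
        exfalso
        rw [hk, pow_zero, mul_one] at h
        omega
      | succ j => exact ⟨j, by rw [hk, pow_succ]; ring⟩
  | case2 p h =>
    intro hp
    rw [is_a_power_of_loop, dif_neg h]
    have hpy : y.natAbs ≤ p.natAbs := by
      by_cases hlt : p.natAbs < y.natAbs
      · exact absurd ⟨hx, hp, hlt⟩ h
      · omega
    simp only [decide_eq_true_eq]
    constructor
    · intro hpe
      exact ⟨0, by rw [pow_zero, mul_one, hpe]⟩
    · rintro ⟨k, hk⟩
      cases k with
      | zero => rw [hk, pow_zero, mul_one]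
      | succ j =>
        exfalso
        have hya : y.natAbs = p.natAbs * x.natAbs ^ (j + 1) := by
          rw [hk, Int.natAbs_mul, Int.natAbs_pow]
        have h2 : 2 ≤ x.natAbs ^ (j + 1) := by
          calc 2 ≤ x.natAbs := hx
          _ = x.natAbs ^ 1 := (pow_one _).symm
          _ ≤ x.natAbs ^ (j + 1) := Nat.pow_le_pow_right (by omega) (by omega)
        have h3 : p.natAbs * 2 ≤ p.natAbs * x.natAbs ^ (j + 1) :=
          Nat.mul_le_mul_left _ h2
        omega

-- ===== VERDICT (by name: the statement is the Claim_ definition above) =====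
theorem is_a_power_of_spec : Claim_equal_is_a_power_of := by
  intro x y _ hpre
  unfold Spec_is_a_power_of is_a_power_of is_a_power_of_alt
  obtain ⟨h0, hy0, h1, hm1⟩ := hpre
  by_cases hxy : x = y
  · rw [is_a_power_of_go, if_pos hxy, if_pos hxy]
  · rw [if_neg hxy]
    by_cases hy1 : y = 1
    · rw [is_a_power_of_go, if_neg hxy, if_pos hy1, if_pos hy1]
    · rw [if_neg hy1]
      -- in the remaining region Pre_ forces |x| ≥ 2 and y ≠ 0
      have hyz : y ≠ 0 := by
        intro h; exact hxy ((hy0 h).symm ▸ h ▸ rfl)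
      have hx2 : 2 ≤ x.natAbs := by
        rcases lt_trichotomy x 0 with hneg | hzero | hpos
        · have hne : x ≠ -1 := by
            intro h
            rcases hm1 h with h' | h'
            · exact hy1 h'
            · exact hxy (h.trans h'.symm)
          omega
        · rcases h0 hzero with h | h
          · exact absurd (hzero.trans h.symm) hxy
          · exact absurd h hy1
        · have hne : x ≠ 1 := fun h => hy1 (h1 h)
          omega
      have hguard : ¬ (x.natAbs ≤ 1 ∨ y = 0) := by
        rintro (h | h)
        · omega
        · exact hyz h
      rw [if_neg hguard]
      have hA := is_a_power_of_go_iff x hx2 (y.natAbs + 1) y hyz (by omega)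
      have hB := is_a_power_of_loop_iff x y hx2 x (by omega)
      have hiff : (∃ k : Nat, y = x ^ k) ↔ (∃ k : Nat, y = x * x ^ k) := by
        constructor
        · rintro ⟨k, hk⟩
          cases k with
          | zero => exact absurd (by simpa using hk) hy1
          | succ j => exact ⟨j, by rw [hk, pow_succ]; ring⟩
        · rintro ⟨k, hk⟩
          exact ⟨k + 1, by rw [hk, pow_succ]; ring⟩
      exact Bool.coe_iff_coe.mp (hA.trans (hiff.trans hB.symm))
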